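-- pv_equiv track=rewrite | github.com/jeewood/gbk4subl | gbk.py | CheckUnicodeWithoutBOM
-- ===== SOURCE A (Python) =====
-- def CheckUnicodeWithoutBOM(buf):
--     bAllAscii=True
--     nBytes = 0
--     for ch in buf:
--         if ch & 0x80 != 0:
--             bAllAscii=False
--         if nBytes==0:
--             if ch>=0x80:
--                 if ch >=0xFC and ch <= 0xFD:
--                     nBytes=6
--                 elif ch >= 0xF8:
--                     nBytes=5
--                 elif ch >= 0xF0:
--                     nBytes=4
--                 elif ch >= 0xE0:
--                     nBytes=3
--                 elif ch >= 0xC0: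
--                     nBytes=2
--                 else:
--                     return False
--                 nBytes-=1
--         else:
--             if (ch & 0xC0) != 0x80:
--                 return False
--             nBytes-=1
--     if nBytes > 0:
--         return False
--     if bAllAscii:
--         return False
--     return True
-- ===== SOURCE B (Python) =====
-- def CheckUnicodeWithoutBOM(buf):
--     n = len(buf)
--     i = 0
--     ascii_only = True
--     while i < n:
--         ch = buf[i]
--         i += 1
--         if ch & 0x80:
--             ascii_only = False
--         if ch < 0x80:
--             continue
--         # lead byte: expected number of continuation bytes (same ladder as the
--         # original, including its 0xFE/0xFF-as-5-byte-lead quirk)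
--         if 0xFC <= ch <= 0xFD:
--             need = 5
--         elif ch >= 0xF8:
--             need = 4
--         elif ch >= 0xF0:
--             need = 3
--         elif ch >= 0xE0:
--             need = 2
--         elif ch >= 0xC0:
--             need = 1
--         else:
--             return False
--         if i + need > n:
--             return False
--         for j in range(i, i + need):
--             if (buf[j] & 0xC0) != 0x80:
--                 return False
--         i += need
--         ascii_only = False  # a valid continuation byte always has bit 7 set
--     return not ascii_only
-- ===== Notes on version B (the rewrite author's own statement) =====
-- stated objective: alternative
-- what changed: Replaces the flat per-byte state machine (a pending-continuation counter threaded through one loop) with a sequence-driven loop: at each lead byte the expected length is computed once and the continuation bytes are consumed by a dedicated inner loop, the all-ascii flag being cleared wholesale after a consumed sequence.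
import Mathlib
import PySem

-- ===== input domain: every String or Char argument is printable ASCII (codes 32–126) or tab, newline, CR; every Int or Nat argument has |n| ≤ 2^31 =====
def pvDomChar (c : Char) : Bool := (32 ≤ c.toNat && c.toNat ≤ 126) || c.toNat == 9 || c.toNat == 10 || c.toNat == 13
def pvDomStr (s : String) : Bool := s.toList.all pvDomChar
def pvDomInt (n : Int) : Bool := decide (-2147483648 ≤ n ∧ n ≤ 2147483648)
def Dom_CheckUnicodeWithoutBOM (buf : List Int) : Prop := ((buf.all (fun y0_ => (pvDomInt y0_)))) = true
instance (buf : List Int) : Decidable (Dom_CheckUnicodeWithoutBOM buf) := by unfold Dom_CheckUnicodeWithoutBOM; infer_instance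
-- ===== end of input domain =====

-- B replaces A's flat counter state machine by a sequence-driven loop that
-- consumes each multibyte sequence with an inner loop (objective: alternative).

-- ===== PORT A =====
-- the for-loop of A, threading (bAllAscii, nBytes) through the buffer
def goA : List Int → Bool → Int → Bool
  | [], bAllAscii, nBytes =>
      if nBytes > 0 then false else if bAllAscii then false else true
  | ch :: rest, bAllAscii, nBytes =>
      let bAllAscii := if PySem.Int.band ch 0x80 ≠ 0 then false else bAllAscii
      if nBytes = 0 then
        if ch ≥ 0x80 then
          if 0xFC ≤ ch ∧ ch ≤ 0xFD then goA rest bAllAscii (6 - 1)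
          else if ch ≥ 0xF8 then goA rest bAllAscii (5 - 1)
          else if ch ≥ 0xF0 then goA rest bAllAscii (4 - 1)
          else if ch ≥ 0xE0 then goA rest bAllAscii (3 - 1)
          else if ch ≥ 0xC0 then goA rest bAllAscii (2 - 1)
          else false
        else goA rest bAllAscii nBytes
      else
        if PySem.Int.band ch 0xC0 ≠ 0x80 then false
        else goA rest bAllAscii (nBytes - 1)

def CheckUnicodeWithoutBOM (buf : List Int) : Bool := goA buf true 0

-- ===== PORT B =====
-- expected number of continuation bytes for a lead byte (≥ 0x80); none = invalid lead
def needLen (ch : Int) : Option Nat :=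
  if 0xFC ≤ ch ∧ ch ≤ 0xFD then some 5
  else if 0xF8 ≤ ch then some 4
  else if 0xF0 ≤ ch then some 3
  else if 0xE0 ≤ ch then some 2
  else if 0xC0 ≤ ch then some 1
  else none

-- B's inner loop: consume exactly k continuation bytes; none = invalid/truncated
def consume : Nat → List Int → Option (List Int)
  | 0, rest => some rest
  | _ + 1, [] => none
  | k + 1, b :: rest =>
      if PySem.Int.band b 0xC0 ≠ 0x80 then none else consume k rest

-- needed by goB's termination argument
theorem consume_length : ∀ (k : Nat) (l l' : List Int), consume k l = some l' → l'.length ≤ l.length := by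
  intro k
  induction k with
  | zero => intro l l' h; simp [consume] at h; simp [h]
  | succ j ih =>
    intro l l' h
    cases l with
    | nil => simp [consume] at h
    | cons b rest =>
      simp only [consume] at h
      split_ifs at h
      have := ih rest l' h
      simp
      omega

-- B's outer loop over lead positions
def goB : List Int → Bool → Bool
  | [], asciiOnly => !asciiOnly
  | ch :: rest, asciiOnly =>
      let asciiOnly := if PySem.Int.band ch 0x80 ≠ 0 then false else asciiOnly
      if ch < 0x80 then goB rest asciiOnly
      else
        match needLen ch with
        | none => false
        | some k =>
          match h : consume k rest with
          | none => false
          | some rest' => goB rest' false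
termination_by l _ => l.length
decreasing_by
  · simp
  · have := consume_length k rest rest' h
    simp
    omega

def CheckUnicodeWithoutBOM_alt (buf : List Int) : Bool := goB buf true

-- ===== PRECONDITION & SPEC =====
def Spec_CheckUnicodeWithoutBOM (buf : List Int) (out : Bool) : Prop := out = CheckUnicodeWithoutBOM_alt buf
instance (buf : List Int) (out : Bool) : Decidable (Spec_CheckUnicodeWithoutBOM buf out) := by unfold Spec_CheckUnicodeWithoutBOM; infer_instance

-- ===== CLAIM (what is proved, stated in full; the proofs are below) =====
def Claim_equal_CheckUnicodeWithoutBOM : Prop := ∀ (buf : List Int), Dom_CheckUnicodeWithoutBOM buf → Spec_CheckUnicodeWithoutBOM buf (CheckUnicodeWithoutBOM buf)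

-- ===== LEMMAS AND PROOFS =====

-- a valid continuation byte has its high bit set
theorem cont_clears (b : Int) (h : PySem.Int.band b 0xC0 = 0x80) :
    PySem.Int.band b 0x80 = 0x80 := by
  by_cases hb : 0 ≤ b
  · have h' : b.toNat &&& 192 = 128 := by
      have := h
      simp [PySem.Int.band, hb] at this
      exact_mod_cast this
    have e : (192 &&& 128 : Nat) = 128 := by decide
    have : b.toNat &&& 128 = 128 := by
      calc b.toNat &&& 128 = b.toNat &&& (192 &&& 128) := by rw [e]
        _ = b.toNat &&& 192 &&& 128 := (Nat.land_assoc _ _ _).symm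
        _ = 128 := by rw [h']; decide
    simp [PySem.Int.band, hb, this]
  · have h' : ((192 - (192 &&& (-b - 1).toNat) : Nat) : Int) = 128 := by
      simpa only [PySem.Int.band, if_neg hb, if_pos (show (0:Int) ≤ 0xC0 by norm_num)] using h
    have hle : 192 &&& (-b - 1).toNat ≤ 192 := Nat.and_le_left
    have hx : 192 &&& (-b - 1).toNat = 64 := by omega
    have e2 : (128 &&& 192 : Nat) = 128 := by decide
    have hz : 128 &&& (-b - 1).toNat = 0 := by
      calc 128 &&& (-b - 1).toNat = 128 &&& 192 &&& (-b - 1).toNat := by rw [e2]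
        _ = 128 &&& (192 &&& (-b - 1).toNat) := Nat.land_assoc _ _ _
        _ = 0 := by rw [hx]; decide
    simp only [PySem.Int.band, if_neg hb, if_pos (show (0:Int) ≤ 0x80 by norm_num)]
    norm_num
    rw [show (128:Int).toNat = 128 from rfl, show (-b).toNat - 1 = (-b - 1).toNat from by omega, hz]
    decide

-- A in a pending-continuation state equals B's consume
theorem goA_cont : ∀ (k : Nat) (l : List Int) (ascii : Bool),
    goA l ascii ((k : Int) + 1) =
      (match consume (k + 1) l with
       | none => false
       | some l' => goA l' false 0) := by
  intro k
  induction k with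
  | zero =>
    intro l ascii
    cases l with
    | nil => simp [goA, consume]
    | cons ch rest =>
      by_cases hc : PySem.Int.band ch 0xC0 = 0x80
      · have h80 := cont_clears ch hc
        simp [goA, consume, hc, h80]
      · simp [goA, consume, hc]
  | succ j ih =>
    intro l ascii
    have hne : ((j : Int) + 1 + 1) ≠ 0 := by omega
    cases l with
    | nil =>
      simp [goA, consume]
      intro h
      exact absurd h (by omega)
    | cons ch rest =>
      by_cases hc : PySem.Int.band ch 0xC0 = 0x80
      · have h80 := cont_clears ch hc
        simp only [goA, consume, hc, h80]
        norm_num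
        rw [if_neg hne]
        exact ih rest false
      · simp [goA, consume, hc, hne]

theorem goA_goB : ∀ (n : Nat) (l : List Int), l.length ≤ n → ∀ ascii, goA l ascii 0 = goB l ascii := by
  intro n
  induction n with
  | zero =>
    intro l hl ascii
    have hnil : l = [] := List.eq_nil_of_length_eq_zero (Nat.le_zero.mp hl)
    subst hnil
    cases ascii <;> simp [goA, goB]
  | succ n ih =>
    intro l hl ascii
    cases l with
    | nil => cases ascii <;> simp [goA, goB]
    | cons ch rest =>
      have hrest : rest.length ≤ n := by simpa using Nat.lt_succ_iff.mp (by simpa using hl)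
      by_cases hlt : ch < 0x80
      · have hge : ¬ ((0x80:Int) ≤ ch) := by omega
        simp only [goA, goB, if_pos hlt, if_neg hge]
        exact ih rest hrest _
      · have hge : (0x80:Int) ≤ ch := by omega
        by_cases c1 : (0xFC:Int) ≤ ch ∧ ch ≤ 0xFD
        · have hk : needLen ch = some 5 := by simp [needLen, c1]
          simp [goA, goB, hk, hlt, hge, c1]
          rw [show (5 : Int) = ((4:Nat):Int) + 1 from by norm_num, goA_cont]
          cases hcon : consume 5 rest with
          | none => simp
          | some l' =>
            simp
            exact ih l' (le_trans (consume_length 5 rest l' hcon) hrest) false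
        · by_cases c2 : (0xF8:Int) ≤ ch
          · have hk : needLen ch = some 4 := by simp [needLen, c1, c2]
            simp [goA, goB, hk, hlt, hge, c1, c2]
            rw [show (4 : Int) = ((3:Nat):Int) + 1 from by norm_num, goA_cont]
            cases hcon : consume 4 rest with
            | none => simp
            | some l' =>
              simp
              exact ih l' (le_trans (consume_length 4 rest l' hcon) hrest) false
          · by_cases c3 : (0xF0:Int) ≤ ch
            · have hk : needLen ch = some 3 := by simp [needLen, c1, c2, c3]
              simp [goA, goB, hk, hlt, hge, c1, c2, c3]
              rw [show (3 : Int) = ((2:Nat):Int) + 1 from by norm_num, goA_cont]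
              cases hcon : consume 3 rest with
              | none => simp
              | some l' =>
                simp
                exact ih l' (le_trans (consume_length 3 rest l' hcon) hrest) false
            · by_cases c4 : (0xE0:Int) ≤ ch
              · have hk : needLen ch = some 2 := by simp [needLen, c1, c2, c3, c4]
                simp [goA, goB, hk, hlt, hge, c1, c2, c3, c4]
                rw [show (2 : Int) = ((1:Nat):Int) + 1 from by norm_num, goA_cont]
                cases hcon : consume 2 rest with
                | none => simp
                | some l' =>
                  simp
                  exact ih l' (le_trans (consume_length 2 rest l' hcon) hrest) false
              · by_cases c5 : (0xC0:Int) ≤ ch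
                · have hk : needLen ch = some 1 := by simp [needLen, c1, c2, c3, c4, c5]
                  simp [goA, goB, hk, hlt, hge, c1, c2, c3, c4, c5]
                  rw [show (1 : Int) = ((0:Nat):Int) + 1 from by norm_num, goA_cont]
                  cases hcon : consume 1 rest with
                  | none => simp
                  | some l' =>
                    simp
                    exact ih l' (le_trans (consume_length 1 rest l' hcon) hrest) false
                · have hk : needLen ch = none := by simp [needLen, c1, c2, c3, c4, c5]
                  simp [goA, goB, hk, hlt, hge, c1, c2, c3, c4, c5]

-- ===== VERDICT (by name: the statement is the Claim_ definition above) =====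
theorem CheckUnicodeWithoutBOM_spec : Claim_equal_CheckUnicodeWithoutBOM := by
  intro buf _
  unfold Spec_CheckUnicodeWithoutBOM CheckUnicodeWithoutBOM CheckUnicodeWithoutBOM_alt
  exact goA_goB buf.length buf le_rfl true
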